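-- pv_equiv track=rewrite | github.com/josd/josd.github.io | brains/cases/algebra_cyclic_z6.py | _expected_gen_k_pairs
-- ===== SOURCE A (Python) =====
-- from typing import Dict, Iterable, List, Optional, Set, Tuple, Union
-- from collections import defaultdict, deque
-- from typing import Set as _SetAlias  # just to avoid confusion below
--
-- def _expected_gen_k_pairs(k: int) -> _SetAlias[Tuple[str, str]]:
--     """
--     Compute expected reachability pairs for Addk on Z6
--     (positive-length paths only).
--     """
--     nodes = list(range(6))
--     edges = {x: {(x + k) % 6} for x in nodes}
--
--     reach: Dict[int, _SetAlias[int]] = {x: set() for x in nodes}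
--     for s in nodes:
--         seen: _SetAlias[int] = set()
--         q = deque()
--         for t in edges[s]:
--             q.append(t)
--             seen.add(t)
--             reach[s].add(t)
--         while q:
--             u = q.popleft()
--             for v in edges[u]:
--                 if v not in seen:
--                     seen.add(v)
--                     q.append(v)
--                     reach[s].add(v)
--
--     return {(str(x), str(y)) for x in nodes for y in reach[x]}
-- ===== SOURCE B (Python) =====
-- from typing import Set as _SetAlias, Tuple
--
-- def _expected_gen_k_pairs(k: int) -> _SetAlias[Tuple[str, str]]:
--     # Each node has exactly one successor x -> (x+k) % 6, so the set of nodes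
--     # reachable from x by a positive-length path is the orbit {(x + j*k) % 6 : j >= 1};
--     # j = 1..6 covers the whole orbit since its length divides 6.
--     return {(str(x), str((x + j * k) % 6)) for x in range(6) for j in range(1, 7)}
-- ===== Notes on version B (the rewrite author's own statement) =====
-- stated objective: simpler
-- what changed: Replaced the graph/BFS/deque reachability computation with a one-line closed-form orbit comprehension {(str(x), str((x+j*k)%6)) : x in 0..5, j in 1..6}, using that each node has a single successor so reachability is the orbit of the +k map.
import Mathlib
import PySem

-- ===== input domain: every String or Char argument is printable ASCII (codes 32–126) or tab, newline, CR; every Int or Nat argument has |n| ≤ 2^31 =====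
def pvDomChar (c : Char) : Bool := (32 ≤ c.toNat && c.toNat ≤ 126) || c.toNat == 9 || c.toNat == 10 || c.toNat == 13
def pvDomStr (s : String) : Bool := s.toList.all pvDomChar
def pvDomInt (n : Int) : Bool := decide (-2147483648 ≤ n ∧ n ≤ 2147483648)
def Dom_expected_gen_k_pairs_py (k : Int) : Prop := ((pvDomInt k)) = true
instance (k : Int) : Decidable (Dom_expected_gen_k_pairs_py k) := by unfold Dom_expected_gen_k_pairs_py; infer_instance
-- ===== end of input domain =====

-- B replaces A's 6-node graph + BFS/deque/seen reachability computation by the closed-form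
-- orbit comprehension {(str x, str((x+j*k)%6)) : x in 0..5, j in 1..6} (objective: simpler).

-- ===== PORT A =====
-- edges = {x: {(x + k) % 6} for x in nodes}
def pvEdges (k : Int) : PySem.Dict Int (PySem.Set Int) :=
  (PySem.List.pyRange 0 6 1).foldl
    (fun d x => PySem.Dict.insert d x (PySem.Set.ofList [PySem.Int.mod (x + k) 6])) PySem.Dict.empty

-- the 'while q:' BFS loop, with fuel making the recursion total (never exhausted: at most
-- 6 distinct nodes are ever enqueued); state = (q, seen, reach)
def pvBFS (edges : PySem.Dict Int (PySem.Set Int)) (s : Int) :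
    Nat → List Int → PySem.Set Int → PySem.Dict Int (PySem.Set Int) → PySem.Dict Int (PySem.Set Int)
  | _, [], _, reach => reach
  | 0, _, _, reach => reach
  | fuel + 1, u :: q, seen, reach =>
      let st := (PySem.Dict.getD edges u PySem.Set.empty).foldl
        (fun (st : List Int × PySem.Set Int × PySem.Dict Int (PySem.Set Int)) v =>
          if PySem.Set.contains st.2.1 v then st
          else (st.1 ++ [v], PySem.Set.add st.2.1 v,
                PySem.Dict.insert st.2.2 s (PySem.Set.add (PySem.Dict.getD st.2.2 s PySem.Set.empty) v)))
        (q, seen, reach)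
      pvBFS edges s fuel st.1 st.2.1 st.2.2

-- everything after the edges comprehension, as a function of edges
def pvFromEdges (edges : PySem.Dict Int (PySem.Set Int)) : List (String × String) :=
  let nodes := PySem.List.pyRange 0 6 1
  let reach0 : PySem.Dict Int (PySem.Set Int) :=
    nodes.foldl (fun d x => PySem.Dict.insert d x PySem.Set.empty) PySem.Dict.empty
  let reach := nodes.foldl (fun reach s =>
    -- initial 'for t in edges[s]' loop: enqueue, mark seen, record in reach[s]
    let init := (PySem.Dict.getD edges s PySem.Set.empty).foldl
      (fun (st : List Int × PySem.Set Int × PySem.Dict Int (PySem.Set Int)) t =>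
        (st.1 ++ [t], PySem.Set.add st.2.1 t,
         PySem.Dict.insert st.2.2 s (PySem.Set.add (PySem.Dict.getD st.2.2 s PySem.Set.empty) t)))
      (([] : List Int), PySem.Set.empty, reach)
    pvBFS edges s 16 init.1 init.2.1 init.2.2) reach0
  PySem.Set.ofList (nodes.flatMap (fun x =>
    (PySem.Dict.getD reach x PySem.Set.empty).map (fun y => (PySem.Int.toStr x, PySem.Int.toStr y))))

def expected_gen_k_pairs_py (k : Int) : List (String × String) :=
  pvFromEdges (pvEdges k)

-- ===== PORT B =====
def expected_gen_k_pairs_py_alt (k : Int) : List (String × String) :=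
  PySem.Set.ofList ((PySem.List.pyRange 0 6 1).flatMap (fun x =>
    (PySem.List.pyRange 1 7 1).map (fun j =>
      (PySem.Int.toStr x, PySem.Int.toStr (PySem.Int.mod (x + j * k) 6)))))

-- ===== PRECONDITION & SPEC =====
def Spec_expected_gen_k_pairs_py (k : Int) (out : List (String × String)) : Prop := out = expected_gen_k_pairs_py_alt k
instance (k : Int) (out : List (String × String)) : Decidable (Spec_expected_gen_k_pairs_py k out) := by unfold Spec_expected_gen_k_pairs_py; infer_instance

-- ===== CLAIM (what is proved, stated in full; the proofs are below) =====
def Claim_equal_expected_gen_k_pairs_py : Prop := ∀ (k : Int), Dom_expected_gen_k_pairs_py k → Spec_expected_gen_k_pairs_py k (expected_gen_k_pairs_py k)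

-- ===== LEMMAS AND PROOFS =====

theorem pv_mod6_pos : (0 : Int) < 6 := by norm_num

-- the map x ↦ (x+k) % 6 only depends on k % 6
theorem pvEdges_mod (k : Int) : pvEdges k = pvEdges (PySem.Int.mod k 6) := by
  have h : ∀ x : Int, PySem.Int.mod (x + k) 6 = PySem.Int.mod (x + PySem.Int.mod k 6) 6 := by
    intro x
    rw [PySem.Int.mod_eq_emod_of_pos pv_mod6_pos, PySem.Int.mod_eq_emod_of_pos pv_mod6_pos,
        PySem.Int.mod_eq_emod_of_pos pv_mod6_pos]
    omega
  simp only [pvEdges, h]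

theorem pvA_mod (k : Int) :
    expected_gen_k_pairs_py k = expected_gen_k_pairs_py (PySem.Int.mod k 6) := by
  unfold expected_gen_k_pairs_py
  rw [pvEdges_mod]

theorem pvB_mod (k : Int) :
    expected_gen_k_pairs_py_alt k = expected_gen_k_pairs_py_alt (PySem.Int.mod k 6) := by
  have h : ∀ x j : Int,
      PySem.Int.mod (x + j * k) 6 = PySem.Int.mod (x + j * PySem.Int.mod k 6) 6 := by
    intro x j
    rw [PySem.Int.mod_eq_emod_of_pos pv_mod6_pos, PySem.Int.mod_eq_emod_of_pos pv_mod6_pos,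
        PySem.Int.mod_eq_emod_of_pos pv_mod6_pos]
    have hm : (j * k) % 6 = (j * (k % 6)) % 6 := by
      conv_lhs => rw [Int.mul_emod]
      conv_rhs => rw [Int.mul_emod]
      rw [Int.emod_emod_of_dvd _ (dvd_refl 6)]
    omega
  simp only [expected_gen_k_pairs_py_alt, h]

-- ===== VERDICT (by name: the statement is the Claim_ definition above) =====
set_option maxRecDepth 4000 in
theorem expected_gen_k_pairs_py_spec : Claim_equal_expected_gen_k_pairs_py := by
  intro k _
  unfold Spec_expected_gen_k_pairs_py
  rw [pvA_mod, pvB_mod]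
  have hbound : 0 ≤ PySem.Int.mod k 6 ∧ PySem.Int.mod k 6 < 6 := by
    rw [PySem.Int.mod_eq_emod_of_pos pv_mod6_pos]
    omega
  have hcase : PySem.Int.mod k 6 = 0 ∨ PySem.Int.mod k 6 = 1 ∨ PySem.Int.mod k 6 = 2 ∨
      PySem.Int.mod k 6 = 3 ∨ PySem.Int.mod k 6 = 4 ∨ PySem.Int.mod k 6 = 5 := by omega
  rcases hcase with h | h | h | h | h | h <;> rw [h] <;> decide
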